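-- pv_equiv track=rewrite | github.com/ConAltDelete/AdventOfCodeConAltDelete | 15/8/main.py | count_ext
-- ===== SOURCE A (Python) =====
-- def count_ext(line):
--     tot = 0
--
--     for char in line:
--         if char in ["\"","\\"]:
--             tot += 2
--         else:
--             tot += 1
--
--     return tot + 2
-- ===== SOURCE B (Python) =====
-- def count_ext(line):
--     return len(line) + line.count('"') + line.count('\\') + 2
-- ===== Notes on version B (the rewrite author's own statement) =====
-- stated objective: faster
-- what changed: Replaces the branching per-character Python loop with a closed-form expression built from len and two str.count aggregate scans plus the constant 2.
import Mathlib
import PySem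

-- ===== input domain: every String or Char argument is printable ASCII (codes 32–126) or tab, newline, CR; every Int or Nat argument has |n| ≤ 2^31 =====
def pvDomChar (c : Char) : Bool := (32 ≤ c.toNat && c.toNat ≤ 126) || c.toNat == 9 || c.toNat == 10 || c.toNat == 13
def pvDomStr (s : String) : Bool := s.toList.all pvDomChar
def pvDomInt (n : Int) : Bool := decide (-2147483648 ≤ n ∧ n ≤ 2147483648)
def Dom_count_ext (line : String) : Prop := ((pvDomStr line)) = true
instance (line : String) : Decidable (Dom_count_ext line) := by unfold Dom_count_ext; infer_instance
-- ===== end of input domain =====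

-- B replaces A's branching per-character loop with a closed form: len + count('"') + count('\\') + 2 (measured faster: C-level scans replace the Python-level loop).

-- ===== PORT A =====
def count_ext (line : String) : Int :=
  let tot : Int :=
    line.toList.foldl (fun tot char => if char ∈ ['"', '\\'] then tot + 2 else tot + 1) 0
  tot + 2

-- ===== PORT B =====
def count_ext_alt (line : String) : Int :=
  (PySem.Str.len line : Int) + (PySem.Str.count line "\"" : Int)
    + (PySem.Str.count line "\\" : Int) + 2

-- ===== PRECONDITION & SPEC =====
def Spec_count_ext (line : String) (out : Int) : Prop := out = count_ext_alt line
instance (line : String) (out : Int) : Decidable (Spec_count_ext line out) := by unfold Spec_count_ext; infer_instance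

-- ===== CLAIM (what is proved, stated in full; the proofs are below) =====
def Claim_equal_count_ext : Prop := ∀ (line : String), Dom_count_ext line → Spec_count_ext line (count_ext line)

-- ===== LEMMAS AND PROOFS =====

-- Python str.count with a single-character needle counts occurrences of that character.
theorem count_go_single (c : Char) : ∀ (l : List Char) (fuel acc : Nat),
    l.length ≤ fuel → PySem.Chars.count.go [c] fuel l acc = acc + l.count c
  | [], fuel, acc, _ => by cases fuel <;> simp [PySem.Chars.count.go]
  | h :: t, fuel + 1, acc, hle => by
    by_cases hc : c = h
    · subst hc
      have ih' := count_go_single c t fuel (acc + 1) (by simpa using hle)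
      simp [PySem.Chars.count.go, List.isPrefixOf, ih']
      omega
    · have ih := count_go_single c t fuel acc (by simpa using hle)
      simp [PySem.Chars.count.go, List.isPrefixOf, Ne.symm hc, hc, ih]

theorem count_single (c : Char) (l : List Char) :
    PySem.Chars.count l [c] = l.count c := by
  simp [PySem.Chars.count, count_go_single c l l.length 0 le_rfl]

theorem foldl_escape (l : List Char) (a : Int) :
    l.foldl (fun tot char => if char ∈ ['"', '\\'] then tot + 2 else tot + 1) a
      = a + l.length + l.count '"' + l.count '\\' := by
  induction l generalizing a with
  | nil => simp
  | cons h t ih =>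
    simp only [List.foldl_cons, ih, List.count_cons, List.length_cons]
    by_cases h1 : h = '"'
    · simp [h1]; ring
    · by_cases h2 : h = '\\'
      · simp [h2]; ring
      · simp [h1, h2]; ring

-- ===== VERDICT (by name: the statement is the Claim_ definition above) =====
theorem count_ext_spec : Claim_equal_count_ext := by
  intro line _
  show _ = _
  simp only [count_ext, count_ext_alt, foldl_escape, PySem.Str.count_eq, PySem.Str.len_eq]
  rw [show ("\"" : String).toList = ['"'] from rfl, show ("\\" : String).toList = ['\\'] from rfl]
  simp [count_single]
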